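-- pv_equiv track=rewrite | github.com/KallerIsaac10086/PySS | PySS_P3_A01.py | split_string_expr
-- ===== SOURCE A (Python) =====
-- def split_string_expr(expr):
--     # 分割字符串表达式，例如："Hello" + ", " + name + "!"
--     tokens = []
--     current = ''
--     in_string = False
--     i = 0
--     while i < len(expr):
--         char = expr[i]
--         if char == '"':
--             if in_string:
--                 current += char
--                 tokens.append(current.strip())
--                 current = ''
--                 in_string = False
--             else:
--                 if current.strip():
--                     tokens.append(current.strip())
--                 current = char
--                 in_string = True
--         elif char in '+':
--             if not in_string:
--                 if current.strip():
--                     tokens.append(current.strip())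
--                 tokens.append('+')
--                 current = ''
--             else:
--                 current += char
--         else:
--             current += char
--         i += 1
--     if current.strip():
--         tokens.append(current.strip())
--     # 移除 '+'
--     return [token for token in tokens if token != '+']
-- ===== SOURCE B (Python) =====
-- def split_string_expr(expr):
--     # Split on quote marks: even-index parts are outside strings, odd-index inside.
--     parts = expr.split('"')
--     out = []
--     for i, seg in enumerate(parts):
--         if i % 2 == 0:
--             # outside a string literal: '+' is a separator, keep stripped nonempty pieces
--             for piece in seg.split('+'):
--                 p = piece.strip()
--                 if p:
--                     out.append(p)
--         elif i < len(parts) - 1: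
--             # a complete quoted string literal
--             out.append('"' + seg + '"')
--         else:
--             # unterminated quoted string at the end of the input
--             out.append(('"' + seg).strip())
--     return out
-- ===== Notes on version B (the rewrite author's own statement) =====
-- stated objective: simpler
-- what changed: Replaces A's character-by-character state machine (in_string flag, per-char string accumulator, append-plus-then-filter) with one split on the quote character whose alternating parts are either split on the plus sign and stripped (even parts) or wrapped back in quotes (odd parts).
import Mathlib
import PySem

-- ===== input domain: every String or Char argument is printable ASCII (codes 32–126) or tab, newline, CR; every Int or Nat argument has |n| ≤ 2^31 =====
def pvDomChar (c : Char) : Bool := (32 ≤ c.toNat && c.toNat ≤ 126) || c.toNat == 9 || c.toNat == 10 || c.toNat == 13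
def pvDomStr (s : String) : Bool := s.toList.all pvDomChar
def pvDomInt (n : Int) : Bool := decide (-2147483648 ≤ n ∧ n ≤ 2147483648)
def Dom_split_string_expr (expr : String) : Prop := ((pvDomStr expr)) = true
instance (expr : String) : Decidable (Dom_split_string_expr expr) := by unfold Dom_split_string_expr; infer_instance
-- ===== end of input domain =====

-- B splits the input once on '"' (odd parts are string literals, even parts are split on '+'),
-- replacing A's character-by-character in_string state machine; objective: simpler.

-- ===== PORT A =====
-- the while-loop body of A, one character at a time; state = (tokens, current, in_string)
def sseStepA (st : List (List Char) × List Char × Bool) (c : Char) :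
    List (List Char) × List Char × Bool :=
  if c = '"' then
    if st.2.2 then
      (st.1 ++ [PySem.Chars.strip (st.2.1 ++ [c])], [], false)
    else if PySem.Chars.strip st.2.1 ≠ [] then
      (st.1 ++ [PySem.Chars.strip st.2.1], [c], true)
    else (st.1, [c], true)
  else if c = '+' then
    if st.2.2 then (st.1, st.2.1 ++ [c], st.2.2)
    else if PySem.Chars.strip st.2.1 ≠ [] then
      (st.1 ++ [PySem.Chars.strip st.2.1, ['+']], [], false)
    else (st.1 ++ [['+']], [], false)
  else (st.1, st.2.1 ++ [c], st.2.2)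

def split_string_expr (expr : String) : List String :=
  let r := expr.toList.foldl sseStepA ([], [], false)
  let tokens := if PySem.Chars.strip r.2.1 ≠ [] then r.1 ++ [PySem.Chars.strip r.2.1] else r.1
  (tokens.filter (fun t => t != ['+'])).map String.ofList

-- ===== PORT B =====
def split_string_expr_alt (expr : String) : List String :=
  let parts := PySem.Chars.splitOn expr.toList ['"']
  let out := (PySem.List.enumerate parts 0).foldl (fun out p =>
    if PySem.Int.mod p.1 2 = 0 then
      (PySem.Chars.splitOn p.2 ['+']).foldl (fun o piece =>
        if PySem.Chars.strip piece ≠ [] then o ++ [PySem.Chars.strip piece] else o) out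
    else if p.1 < PySem.List.len parts - 1 then
      out ++ [['"'] ++ p.2 ++ ['"']]
    else
      out ++ [PySem.Chars.strip (['"'] ++ p.2)]) []
  out.map String.ofList

-- ===== PRECONDITION & SPEC =====
def Spec_split_string_expr (expr : String) (out : List String) : Prop := out = split_string_expr_alt expr
instance (expr : String) (out : List String) : Decidable (Spec_split_string_expr expr out) := by unfold Spec_split_string_expr; infer_instance

-- ===== CLAIM (what is proved, stated in full; the proofs are below) =====
def Claim_equal_split_string_expr : Prop := ∀ (expr : String), Dom_split_string_expr expr → Spec_split_string_expr expr (split_string_expr expr)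

-- ===== LEMMAS AND PROOFS =====

-- token emitted by A for a finished outside-string accumulator
def sseEmit (cur : List Char) : List (List Char) :=
  if PySem.Chars.strip cur ≠ [] then [PySem.Chars.strip cur] else []

-- common character-level specification both ports are reduced to
def sseSpec : Bool → List Char → List Char → List (List Char)
  | false, cur, [] => sseEmit cur
  | true, acc, [] => ['"' :: PySem.Chars.rstrip acc]
  | false, cur, c :: cs =>
      if c = '"' then sseEmit cur ++ sseSpec true [] cs
      else if c = '+' then sseEmit cur ++ sseSpec false [] cs
      else sseSpec false (cur ++ [c]) cs
  | true, acc, c :: cs =>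
      if c = '"' then ('"' :: acc ++ ['"']) :: sseSpec false [] cs
      else sseSpec true (acc ++ [c]) cs

-- functional model of str.split(sep) for a one-character separator
def sseSplit (q : Char) (pre : List Char) : List Char → List (List Char)
  | [] => [pre]
  | c :: cs => if c = q then pre :: sseSplit q [] cs else sseSplit q (pre ++ [c]) cs

-- strip-and-drop-empties post-pass (contribution of an even part of B)
def sseMF (l : List (List Char)) : List (List Char) :=
  (l.filter (fun x => PySem.Chars.strip x != [])).map PySem.Chars.strip

def ssePe (seg : List Char) : List (List Char) :=
  sseMF (PySem.Chars.splitOn seg ['+'])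

-- index-free model of B's enumerate fold (flag = current part index is even)
def sseG : Bool → List (List Char) → List (List Char)
  | _, [] => []
  | e, seg :: ps =>
      (if e then ssePe seg
       else if ps ≠ [] then [['"'] ++ seg ++ ['"']]
       else [PySem.Chars.strip (['"'] ++ seg)]) ++ sseG (!e) ps

-- ---- strip facts ----
lemma sse_rstrip_cons (c : Char) (xs : List Char) (h : PySem.Chars.isspace c = false) :
    PySem.Chars.rstrip (c :: xs) = c :: PySem.Chars.rstrip xs := by
  unfold PySem.Chars.rstrip
  rw [show (c :: xs).reverse = xs.reverse ++ [c] by simp, List.dropWhile_append]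
  by_cases he : (xs.reverse.dropWhile PySem.Chars.isspace) = []
  · simp [he, List.dropWhile, h]
  · simp [he]

lemma sse_strip_cons (c : Char) (xs : List Char) (h : PySem.Chars.isspace c = false) :
    PySem.Chars.strip (c :: xs) = c :: PySem.Chars.rstrip xs := by
  unfold PySem.Chars.strip PySem.Chars.lstrip
  rw [List.dropWhile_cons_of_neg (by simp [h])]
  exact sse_rstrip_cons c xs h

lemma sse_rstrip_snoc (xs : List Char) (c : Char) (h : PySem.Chars.isspace c = false) :
    PySem.Chars.rstrip (xs ++ [c]) = xs ++ [c] := by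
  unfold PySem.Chars.rstrip
  rw [List.reverse_append]
  simp [h]

lemma sse_mem_strip {x : Char} {bxs : List Char} (h : x ∈ PySem.Chars.strip bxs) : x ∈ bxs := by
  unfold PySem.Chars.strip PySem.Chars.rstrip PySem.Chars.lstrip at h
  simp at h
  have h1 := (List.dropWhile_sublist (p := PySem.Chars.isspace)
    (l := (List.dropWhile PySem.Chars.isspace bxs).reverse)).mem h
  rw [List.mem_reverse] at h1
  exact (List.dropWhile_sublist (p := PySem.Chars.isspace) (l := bxs)).mem h1

lemma sse_strip_ne_plus {cur : List Char} (h : '+' ∉ cur) :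
    (PySem.Chars.strip cur != ['+']) = true := by
  rw [bne_iff_ne]
  intro he
  exact h (sse_mem_strip (by rw [he]; simp))

-- ---- split facts ----
lemma sse_go_eq (q : Char) : ∀ (l : List Char) (fuel : Nat) (cur : List Char)
    (acc : List (List Char)), l.length < fuel →
    PySem.Chars.splitOn.go [q] fuel l cur acc = acc.reverse ++ sseSplit q cur.reverse l := by
  intro l
  induction l with
  | nil => intro fuel cur acc h
           cases fuel with
           | zero => omega
           | succ f => simp [PySem.Chars.splitOn.go, sseSplit]
  | cons c rest ih =>
      intro fuel cur acc h
      cases fuel with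
      | zero => simp at h
      | succ f =>
        rw [PySem.Chars.splitOn.go]
        by_cases hc : c = q
        · subst hc
          simp only [List.isPrefixOf, beq_self_eq_true, Bool.true_and,
            if_true, List.length_cons, List.drop_succ_cons, List.drop_zero, List.length_nil]
          rw [ih f [] (cur.reverse :: acc) (by simp at h; omega)]
          simp [sseSplit]
        · have : ([q].isPrefixOf (c :: rest)) = false := by
            simp [List.isPrefixOf]; exact fun hq => (hc hq.symm).elim
          simp only [this, Bool.false_eq_true, if_false]
          rw [ih f (c :: cur) acc (by simp at h ⊢; omega)]
          simp [sseSplit, hc]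

lemma sse_splitOn_eq (q : Char) (cs : List Char) :
    PySem.Chars.splitOn cs [q] = sseSplit q [] cs := by
  rw [PySem.Chars.splitOn, sse_go_eq q cs (cs.length + 1) [] [] (by omega)]
  simp

lemma sse_split_no_sep (q : Char) : ∀ (a : List Char) (pre : List Char), q ∉ a →
    sseSplit q pre a = [pre ++ a] := by
  intro a
  induction a with
  | nil => simp [sseSplit]
  | cons c a ih =>
      intro pre h
      simp only [List.mem_cons, not_or] at h
      simp only [sseSplit]; rw [if_neg (fun hc => h.1 hc.symm), ih _ h.2]
      simp

lemma sse_split_first (q : Char) : ∀ (a : List Char) (pre rest : List Char), q ∉ a →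
    sseSplit q pre (a ++ q :: rest) = (pre ++ a) :: sseSplit q [] rest := by
  intro a
  induction a with
  | nil => intro pre rest h; simp [sseSplit]
  | cons c a ih =>
      intro pre rest h
      simp only [List.mem_cons, not_or] at h
      rw [List.cons_append]; simp only [sseSplit]
      rw [if_neg (fun hc => h.1 hc.symm), ih _ _ h.2]
      simp

lemma sse_split_ne_nil (q : Char) : ∀ (l : List Char) (pre : List Char),
    sseSplit q pre l ≠ [] := by
  intro l
  induction l with
  | nil => simp [sseSplit]
  | cons c cs ih =>
      intro pre
      simp only [sseSplit]
      split_ifs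
      · simp
      · exact ih _

lemma sse_first_occ {q : Char} : ∀ {cs : List Char}, q ∈ cs →
    ∃ a rest, cs = a ++ q :: rest ∧ q ∉ a := by
  intro cs
  induction cs with
  | nil => simp
  | cons c cs ih =>
      intro h
      by_cases hc : c = q
      · exact ⟨[], cs, by simp [hc], by simp⟩
      · obtain ⟨a, rest, heq, hna⟩ := ih (by
          rcases List.mem_cons.mp h with h1 | h1
          · exact absurd h1.symm hc
          · exact h1)
        exact ⟨c :: a, rest, by simp [heq], by
          simp only [List.mem_cons, not_or]
          exact ⟨fun hq => hc hq.symm, hna⟩⟩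

-- ---- A reduces to sseSpec ----
def sseFinA (st : List (List Char) × List Char × Bool) : List (List Char) :=
  (if PySem.Chars.strip st.2.1 ≠ [] then st.1 ++ [PySem.Chars.strip st.2.1] else st.1).filter
    (fun t => t != ['+'])

lemma sse_A_loop : ∀ (cs : List Char) (tokens : List (List Char)),
    (∀ cur, '"' ∉ cur → '+' ∉ cur →
      sseFinA (cs.foldl sseStepA (tokens, cur, false)) =
        tokens.filter (fun t => t != ['+']) ++ sseSpec false cur cs)
    ∧ (∀ acc, '"' ∉ acc →
      sseFinA (cs.foldl sseStepA (tokens, '"' :: acc, true)) =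
        tokens.filter (fun t => t != ['+']) ++ sseSpec true acc cs) := by
  intro cs
  induction cs with
  | nil =>
      intro tokens
      constructor
      · intro cur hq hp
        simp only [List.foldl_nil, sseFinA, sseSpec, sseEmit]
        by_cases hs : PySem.Chars.strip cur = []
        · simp [hs]
        · simp only [hs, ne_eq, not_false_iff, if_true, List.filter_append]
          simp [sse_strip_ne_plus hp]
      · intro acc hq
        simp only [List.foldl_nil, sseFinA, sseSpec]
        rw [sse_strip_cons _ _ (by decide)]
        simp [List.filter_append]
  | cons c cs ih =>
      intro tokens
      constructor
      · -- outside-string state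
        intro cur hq hp
        rw [List.foldl_cons]
        by_cases hc1 : c = '"'
        · subst hc1
          by_cases hs : PySem.Chars.strip cur = []
          · rw [show sseStepA (tokens, cur, false) '"' = (tokens, '"' :: ([] : List Char), true) by
                simp [sseStepA, hs]]
            rw [(ih _).2 [] (by simp)]
            simp [sseSpec, sseEmit, hs]
          · rw [show sseStepA (tokens, cur, false) '"' =
                  (tokens ++ [PySem.Chars.strip cur], '"' :: ([] : List Char), true) by
                simp [sseStepA, hs]]
            rw [(ih _).2 [] (by simp)]
            simp only [sseSpec, sseEmit, hs, ne_eq, not_false_iff, if_true,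
              List.filter_append]
            simp [sse_strip_ne_plus hp]
        · by_cases hc2 : c = '+'
          · subst hc2
            by_cases hs : PySem.Chars.strip cur = []
            · rw [show sseStepA (tokens, cur, false) '+' = (tokens ++ [['+']], [], false) by
                  simp [sseStepA, hs]]
              rw [(ih _).1 [] (by simp) (by simp)]
              simp [sseSpec, sseEmit, hs, List.filter_append]
            · rw [show sseStepA (tokens, cur, false) '+' =
                    (tokens ++ [PySem.Chars.strip cur, ['+']], [], false) by
                  simp [sseStepA, hs]]
              rw [(ih _).1 [] (by simp) (by simp)]
              simp only [sseSpec, sseEmit, hs, ne_eq, not_false_iff, if_true,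
                List.filter_append, if_neg (by decide : ¬ ('+' : Char) = '"')]
              simp [sse_strip_ne_plus hp]
          · rw [show sseStepA (tokens, cur, false) c = (tokens, cur ++ [c], false) by
                  simp only [sseStepA]; rw [if_neg hc1, if_neg hc2]]
            rw [(ih _).1 (cur ++ [c])
                (by simp only [List.mem_append, List.mem_singleton, not_or]
                    exact ⟨hq, fun h => hc1 h.symm⟩)
                (by simp only [List.mem_append, List.mem_singleton, not_or]
                    exact ⟨hp, fun h => hc2 h.symm⟩)]
            simp only [sseSpec]
            rw [if_neg hc1, if_neg hc2]
      · -- in-string state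
        intro acc hq
        rw [List.foldl_cons]
        by_cases hc1 : c = '"'
        · subst hc1
          rw [show sseStepA (tokens, '"' :: acc, true) '"' =
                (tokens ++ [PySem.Chars.strip (('"' :: acc) ++ ['"'])], [], false) by
              simp [sseStepA]]
          rw [(ih _).1 [] (by simp) (by simp)]
          rw [show ('"' :: acc) ++ ['"'] = '"' :: (acc ++ ['"']) from rfl]
          rw [sse_strip_cons _ _ (by decide), sse_rstrip_snoc _ _ (by decide)]
          simp only [sseSpec, List.filter_append]
          simp
        · rw [show sseStepA (tokens, '"' :: acc, true) c = (tokens, '"' :: (acc ++ [c]), true) by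
              simp only [sseStepA]; rw [if_neg hc1]; split_ifs <;> rfl]
          rw [(ih _).2 (acc ++ [c])
              (by simp only [List.mem_append, List.mem_singleton, not_or]
                  exact ⟨hq, fun h => hc1 h.symm⟩)]
          simp only [sseSpec]
          rw [if_neg hc1]

-- ---- B reduces to sseG ----
lemma sse_B_fold (parts : List (List Char)) : ∀ (ps : List (List Char)) (k : Nat)
    (out : List (List Char)), k + ps.length = parts.length →
    (PySem.List.enumerate ps (k : Int)).foldl (fun out p =>
      if PySem.Int.mod p.1 2 = 0 then
        (PySem.Chars.splitOn p.2 ['+']).foldl (fun o piece =>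
          if PySem.Chars.strip piece ≠ [] then o ++ [PySem.Chars.strip piece] else o) out
      else if p.1 < PySem.List.len parts - 1 then
        out ++ [['"'] ++ p.2 ++ ['"']]
      else
        out ++ [PySem.Chars.strip (['"'] ++ p.2)]) out
      = out ++ sseG (k % 2 == 0) ps := by
  intro ps
  induction ps with
  | nil => intro k out h; simp [PySem.List.enumerate, sseG]
  | cons seg ps ih =>
      intro k out h
      rw [PySem.List.enumerate_cons, List.foldl_cons]
      have hmod : PySem.Int.mod (k : Int) 2 = ((k % 2 : Nat) : Int) := by
        rw [PySem.Int.mod_eq_emod_of_pos (by norm_num)]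
        omega
      have hcast : ((k : Int) + 1) = ((k + 1 : Nat) : Int) := by push_cast; ring
      have hpar : ((k + 1) % 2 == 0) = !(k % 2 == 0) := by
        rcases Nat.mod_two_eq_zero_or_one k with hk | hk <;> simp [Nat.add_mod, hk]
      by_cases he : k % 2 = 0
      · -- even part
        rw [if_pos (by rw [hmod, he]; norm_num)]
        have hinner : ∀ (o : List (List Char)),
            (PySem.Chars.splitOn seg ['+']).foldl (fun o piece =>
              if PySem.Chars.strip piece ≠ [] then o ++ [PySem.Chars.strip piece] else o) o
            = o ++ ssePe seg := by
          intro o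
          have := PySem.List.foldl_append_if (fun x => PySem.Chars.strip x != [])
            PySem.Chars.strip (PySem.Chars.splitOn seg ['+']) o
          simp only [ssePe, sseMF]
          rw [← this]
          congr 1
          funext a b
          by_cases hb : PySem.Chars.strip b = [] <;> simp [hb]
        rw [hinner, hcast, ih (k+1) _ (by simp at h; omega)]
        simp [sseG, he, hpar]
      · -- odd part
        rw [if_neg (by rw [hmod]; omega)]
        have hlast : ((k : Int) < PySem.List.len parts - 1) ↔ ps ≠ [] := by
          rw [PySem.List.len_eq]
          constructor
          · intro hlt hnil
            subst hnil
            simp at h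
            omega
          · intro hne
            have : ps.length ≠ 0 := fun h0 => hne (List.length_eq_zero_iff.mp h0)
            simp at h ⊢
            omega
        by_cases hps : ps = []
        · rw [if_neg (by rw [hlast]; simp [hps])]
          rw [hcast, ih (k+1) _ (by simp at h ⊢; omega)]
          have : (k % 2 == 0) = false := by simp [he]
          simp [sseG, this, hps, hpar]
        · rw [if_pos (hlast.mpr hps)]
          rw [hcast, ih (k+1) _ (by simp at h ⊢; omega)]
          have : (k % 2 == 0) = false := by simp [he]
          simp [sseG, this, hps, hpar]

-- ---- sseSpec over whole segments ----
lemma sse_mf_cons (pre : List Char) (l : List (List Char)) :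
    sseMF (pre :: l) = sseEmit pre ++ sseMF l := by
  by_cases hs : PySem.Chars.strip pre = [] <;> simp [sseMF, sseEmit, hs]

lemma sse_E1 : ∀ (a cur : List Char), '"' ∉ a → '"' ∉ cur → '+' ∉ cur →
    sseSpec false cur a = sseMF (sseSplit '+' cur a) := by
  intro a
  induction a with
  | nil =>
      intro cur _ _ _
      by_cases hs : PySem.Chars.strip cur = [] <;> simp [sseSpec, sseSplit, sseMF, sseEmit, hs]
  | cons c a ih =>
      intro cur hqa hqc hpc
      simp only [List.mem_cons, not_or] at hqa
      by_cases hc2 : c = '+'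
      · subst hc2
        simp only [sseSpec, sseSplit, if_true,
          if_neg (by decide : ¬ ('+' : Char) = '"')]
        rw [sse_mf_cons, ih [] hqa.2 (by simp) (by simp)]
      · simp only [sseSpec, sseSplit, if_neg (fun h : c = '"' => hqa.1 h.symm),
          if_neg hc2]
        exact ih (cur ++ [c]) hqa.2
          (by simp only [List.mem_append, List.mem_singleton, not_or]
              exact ⟨hqc, hqa.1⟩)
          (by simp only [List.mem_append, List.mem_singleton, not_or]
              exact ⟨hpc, fun h => hc2 h.symm⟩)

lemma sse_E2 : ∀ (a cur rest : List Char), '"' ∉ a → '"' ∉ cur → '+' ∉ cur →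
    sseSpec false cur (a ++ '"' :: rest) = sseMF (sseSplit '+' cur a) ++ sseSpec true [] rest := by
  intro a
  induction a with
  | nil =>
      intro cur rest _ _ _
      simp only [List.nil_append, sseSpec, sseSplit]
      rw [sse_mf_cons]
      simp [sseMF]
  | cons c a ih =>
      intro cur rest hqa hqc hpc
      simp only [List.mem_cons, not_or] at hqa
      by_cases hc2 : c = '+'
      · subst hc2
        simp only [List.cons_append, sseSpec, sseSplit, if_true,
          if_neg (by decide : ¬ ('+' : Char) = '"')]
        rw [sse_mf_cons, ih [] rest hqa.2 (by simp) (by simp)]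
        simp
      · simp only [List.cons_append, sseSpec, sseSplit,
          if_neg (fun h : c = '"' => hqa.1 h.symm), if_neg hc2]
        exact ih (cur ++ [c]) rest hqa.2
          (by simp only [List.mem_append, List.mem_singleton, not_or]
              exact ⟨hqc, hqa.1⟩)
          (by simp only [List.mem_append, List.mem_singleton, not_or]
              exact ⟨hpc, fun h => hc2 h.symm⟩)

lemma sse_E3a : ∀ (b acc : List Char), '"' ∉ b →
    sseSpec true acc b = ['"' :: PySem.Chars.rstrip (acc ++ b)] := by
  intro b
  induction b with
  | nil => intro acc _; simp [sseSpec]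
  | cons c b ih =>
      intro acc hq
      simp only [List.mem_cons, not_or] at hq
      simp only [sseSpec, if_neg (fun h : c = '"' => hq.1 h.symm)]
      rw [ih (acc ++ [c]) hq.2]
      simp

lemma sse_E3b : ∀ (b acc r : List Char), '"' ∉ b →
    sseSpec true acc (b ++ '"' :: r) = ('"' :: (acc ++ b) ++ ['"']) :: sseSpec false [] r := by
  intro b
  induction b with
  | nil => intro acc r _; simp [sseSpec]
  | cons c b ih =>
      intro acc r hq
      simp only [List.mem_cons, not_or] at hq
      simp only [List.cons_append, sseSpec, if_neg (fun h : c = '"' => hq.1 h.symm)]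
      rw [ih (acc ++ [c]) r hq.2]
      simp

-- ---- B's part list reduces to sseSpec ----
theorem sse_GS (cs : List Char) : sseG true (sseSplit '"' [] cs) = sseSpec false [] cs := by
  by_cases hin : '"' ∈ cs
  · obtain ⟨a, rest, heq, hna⟩ := sse_first_occ hin
    subst heq
    rw [sse_split_first _ _ _ _ hna, List.nil_append]
    by_cases hin2 : '"' ∈ rest
    · obtain ⟨b, rest2, heq2, hnb⟩ := sse_first_occ hin2
      subst heq2
      rw [sse_split_first _ _ _ _ hnb, List.nil_append]
      have hne : sseSplit '"' [] rest2 ≠ [] := sse_split_ne_nil _ _ _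
      rw [show sseG true (a :: b :: sseSplit '"' [] rest2) =
            ssePe a ++ [['"'] ++ b ++ ['"']] ++ sseG true (sseSplit '"' [] rest2) by
          simp [sseG, hne]]
      rw [sse_GS rest2]
      rw [sse_E2 a [] _ hna (by simp) (by simp), sse_E3b _ _ _ hnb]
      simp [ssePe, sse_splitOn_eq]
    · rw [sse_split_no_sep _ _ _ hin2, List.nil_append]
      rw [show sseG true (a :: [rest]) =
            ssePe a ++ [PySem.Chars.strip (['"'] ++ rest)] by simp [sseG]]
      rw [sse_E2 a [] _ hna (by simp) (by simp), sse_E3a _ _ hin2]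
      rw [show (['"'] ++ rest : List Char) = '"' :: rest from rfl,
        sse_strip_cons _ _ (by decide)]
      simp [ssePe, sse_splitOn_eq]
  · rw [sse_split_no_sep _ _ _ hin, List.nil_append]
    rw [show sseG true [cs] = ssePe cs by simp [sseG]]
    rw [sse_E1 cs [] hin (by simp) (by simp)]
    simp [ssePe, sse_splitOn_eq]
termination_by cs.length

-- ===== VERDICT (by name: the statement is the Claim_ definition above) =====
theorem split_string_expr_spec : Claim_equal_split_string_expr := by
  unfold Claim_equal_split_string_expr Spec_split_string_expr
  intro expr _
  have hA : split_string_expr expr = (sseSpec false [] expr.toList).map String.ofList := by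
    have h := (sse_A_loop expr.toList []).1 [] (by simp) (by simp)
    simp only [sseFinA, List.filter_nil, List.nil_append] at h
    simp only [split_string_expr]
    rw [h]
  have hB : split_string_expr_alt expr = (sseSpec false [] expr.toList).map String.ofList := by
    simp only [split_string_expr_alt]
    have hb := sse_B_fold (PySem.Chars.splitOn expr.toList ['"'])
      (PySem.Chars.splitOn expr.toList ['"']) 0 [] (by simp)
    rw [Nat.cast_zero] at hb
    rw [hb, List.nil_append, show ((0 : Nat) % 2 == 0) = true from rfl]
    rw [sse_splitOn_eq, sse_GS]
  rw [hA, hB]
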